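-- pv_equiv track=rewrite | github.com/tamir71/SCU | COEN/CSCI181/Homework1/vigenere.py | keyExtend
-- ===== SOURCE A (Python) =====
-- def keyExtend(string, key):
-- 	key = list(key)							# Put our key into a list so we can iterate easily
-- 	if len(string) == len(key):					# Don't need to extend key is key is as long as string
-- 		return(key)
-- 	else:
-- 		for x in range(len(string)-len(key)):			# Repeat for the rest of the missing keylength
-- 			key.append(key[x % len(key)])			# append the key for as long as needed (keeping x modulus'd by key length)
-- 	return(key)
-- ===== SOURCE B (Python) =====
-- def keyExtend(string, key):
--     # Staged approach: replicate the whole key ceil(n/m) times in one block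
--     # operation, then truncate to n; a key at least as long as the string is
--     # returned whole (never truncated).
--     n, m = len(string), len(key)
--     if n <= m:
--         return list(key)
--     reps = -(-n // m)          # ceiling division; ZeroDivisionError for empty key, as in A
--     return list(key * reps)[:n]
-- ===== Notes on version B (the rewrite author's own statement) =====
-- stated objective: simpler
-- what changed: Replaces A's element-by-element self-referential append loop with whole-key block replication: repeat the key ceil(n/m) times with string multiplication and truncate the result to n (returning the key whole when it is at least as long as the string).
import Mathlib
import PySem

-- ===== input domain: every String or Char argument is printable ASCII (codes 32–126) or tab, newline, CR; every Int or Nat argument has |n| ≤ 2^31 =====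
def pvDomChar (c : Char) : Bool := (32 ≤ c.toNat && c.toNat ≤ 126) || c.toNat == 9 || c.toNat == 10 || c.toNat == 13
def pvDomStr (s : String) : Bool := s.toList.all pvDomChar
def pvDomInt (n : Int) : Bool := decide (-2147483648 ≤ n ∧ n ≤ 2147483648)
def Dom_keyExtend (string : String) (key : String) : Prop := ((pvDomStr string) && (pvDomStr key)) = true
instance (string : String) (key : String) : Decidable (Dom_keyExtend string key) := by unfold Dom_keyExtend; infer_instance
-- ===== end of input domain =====

-- B replaces A's element-by-element self-referential append loop by whole-key block
-- replication (repeat the key ceil(n/m) times, then truncate to n); objective: simpler.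

-- ===== PORT A =====
def keyExtend (string : String) (key : String) : List String :=
  let keyl : List String := key.toList.map (fun c => String.mk [c])
  if PySem.Str.len string = PySem.Str.len key then keyl
  else
    (PySem.List.pyRange 0 (PySem.Str.len string - PySem.Str.len key) 1).foldl
      (fun k x => k ++ [(PySem.List.pyGet? k (PySem.Int.mod x (k.length : Int))).getD ""]) keyl

-- ===== PORT B =====
def keyExtend_alt (string : String) (key : String) : List String :=
  let n := PySem.Str.len string
  let m := PySem.Str.len key
  if n ≤ m then key.toList.map (fun c => String.mk [c])
  else
    let reps := -(PySem.Int.floordiv (-n) m)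
    PySem.List.slice ((PySem.List.pyRepeat key.toList reps).map (fun c => String.mk [c]))
      none (some n)

-- ===== PRECONDITION & SPEC =====
-- Pre_ excludes only the inputs where A raises ZeroDivisionError: an empty key with a non-empty string.
def Pre_keyExtend (string : String) (key : String) : Prop :=
  key.toList ≠ [] ∨ string.toList = []
instance (string : String) (key : String) : Decidable (Pre_keyExtend string key) := by
  unfold Pre_keyExtend; infer_instance
def pvWitness_keyExtend : String × String := ("hello", "ab")

def Spec_keyExtend (string : String) (key : String) (out : List String) : Prop := out = keyExtend_alt string key
instance (string : String) (key : String) (out : List String) : Decidable (Spec_keyExtend string key out) := by unfold Spec_keyExtend; infer_instance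

-- ===== CLAIM (what is proved, stated in full; the proofs are below) =====
def Claim_equal_keyExtend : Prop := ∀ (string : String) (key : String), Dom_keyExtend string key → Pre_keyExtend string key → Spec_keyExtend string key (keyExtend string key)

-- ===== LEMMAS AND PROOFS =====

/-- The cyclic extension of `L` to length `k`: position `i` holds `L[i % L.length]`. -/
def cyc (L : List String) (k : Nat) : List String :=
  (List.range k).map (fun i => L.getD (i % L.length) "")

theorem cyc_length (L : List String) (k : Nat) : (cyc L k).length = k := by
  simp [cyc]

theorem cyc_full (L : List String) : cyc L L.length = L := by
  apply List.ext_getElem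
  · simp [cyc]
  · intro i hi hi'
    simp [cyc, List.getD, Nat.mod_eq_of_lt hi', List.getElem?_eq_getElem hi']

theorem cyc_succ (L : List String) (k : Nat) :
    cyc L (k + 1) = cyc L k ++ [L.getD (k % L.length) ""] := by
  simp [cyc, List.range_succ]

theorem cyc_getElem? (L : List String) (k i : Nat) (hi : i < k) :
    (cyc L k)[i]? = some (L.getD (i % L.length) "") := by
  simp [cyc, hi]

theorem cyc_add_self (L : List String) (k : Nat) :
    cyc L (L.length + k) = L ++ cyc L k := by
  unfold cyc
  rw [List.range_add, List.map_append, List.map_map]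
  congr 1
  · exact cyc_full L
  · exact List.map_congr_left (fun j _ => by simp [Nat.add_mod_left])

theorem cyc_take (L : List String) (k n : Nat) :
    (cyc L k).take n = cyc L (min n k) := by
  simp [cyc, ← List.map_take, List.take_range]

theorem flatten_replicate_eq_cyc (L : List String) (r : Nat) :
    (List.replicate r L).flatten = cyc L (r * L.length) := by
  induction r with
  | zero => simp [cyc]
  | succ r ih =>
      rw [List.replicate_succ, List.flatten_cons, ih,
        show (r + 1) * L.length = L.length + r * L.length by ring, cyc_add_self]

-- A's append loop computes the cyclic extension.
theorem foldA (L : List String) (hm : 0 < L.length) (t : Nat) :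
    ((List.range t).map (fun j : Nat => ((0 : Int) + (j : Int)))).foldl
      (fun k x => k ++ [(PySem.List.pyGet? k (PySem.Int.mod x (k.length : Int))).getD ""]) L
    = cyc L (L.length + t) := by
  induction t with
  | zero => simpa using (cyc_full L).symm
  | succ t ih =>
      rw [List.range_succ, List.map_append, List.foldl_append, ih]
      simp only [List.map_cons, List.map_nil, List.foldl_cons, List.foldl_nil, zero_add]
      rw [cyc_length, PySem.Int.mod_natCast, Nat.mod_eq_of_lt (by omega),
        PySem.List.pyGet?_natCast, cyc_getElem? L _ t (by omega), Option.getD_some,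
        show L.length + (t + 1) = (L.length + t) + 1 from rfl, cyc_succ, Nat.add_mod_left]

theorem keyExtend_eq_cyc (s k : String) (hpre : k.toList ≠ [] ∨ s.toList = []) :
    keyExtend s k
      = cyc (k.toList.map (fun c => String.mk [c])) (max s.toList.length k.toList.length) := by
  unfold keyExtend
  rw [PySem.Str.len_eq, PySem.Str.len_eq]
  have hLlen : (k.toList.map (fun c => String.mk [c])).length = k.toList.length := by simp
  by_cases hnm : ((s.toList.length : Int)) = ((k.toList.length : Int))
  · have heq : s.toList.length = k.toList.length := by exact_mod_cast hnm
    rw [if_pos hnm, heq, max_self, ← hLlen, cyc_full]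
  · rw [if_neg hnm]
    by_cases hlt : s.toList.length < k.toList.length
    · rw [PySem.List.pyRange_one_eq_nil (by omega), List.foldl_nil,
        max_eq_right (le_of_lt hlt), ← hLlen, cyc_full]
    · have hgt : k.toList.length < s.toList.length := by
        rcases Nat.lt_or_ge k.toList.length s.toList.length with h' | h'
        · exact h'
        · exact absurd (by exact_mod_cast (Nat.le_antisymm (by omega) h' : k.toList.length = s.toList.length).symm) hnm
      have hmpos : 0 < k.toList.length := by
        rcases hpre with h | h
        · exact List.length_pos_iff.mpr h
        · exact absurd hgt (by rw [h]; simp)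
      rw [show (s.toList.length : Int) - (k.toList.length : Int)
            = (((s.toList.length - k.toList.length : Nat)) : Int) by omega,
        PySem.List.pyRange_one]
      simp only [sub_zero, Int.toNat_natCast]
      rw [foldA _ (by rw [hLlen]; omega) (s.toList.length - k.toList.length), hLlen,
        show k.toList.length + (s.toList.length - k.toList.length) = s.toList.length by omega,
        max_eq_left (le_of_lt hgt)]

theorem keyExtend_alt_eq_cyc (s k : String) (hpre : k.toList ≠ [] ∨ s.toList = []) :
    keyExtend_alt s k
      = cyc (k.toList.map (fun c => String.mk [c])) (max s.toList.length k.toList.length) := by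
  unfold keyExtend_alt
  simp only [PySem.Str.len_eq]
  set n := s.toList.length
  set m := k.toList.length
  have hLlen : (k.toList.map (fun c => String.mk [c])).length = m := by
    rw [List.length_map]
  by_cases hle : (n : Int) ≤ (m : Int)
  · rw [if_pos hle, max_eq_right (by exact_mod_cast hle), ← hLlen, cyc_full]
  · rw [if_neg hle]
    have hgt : m < n := by omega
    have hmpos : 0 < m := by
      rcases hpre with h | h
      · exact List.length_pos_iff.mpr h
      · simp only [h, List.length_nil, n] at hgt; omega
    set q : Int := -(PySem.Int.floordiv (-(n : Int)) (m : Int)) with hq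
    have hdm := PySem.Int.floordiv_mul_add_mod (-(n : Int)) (m : Int)
    have hmod0 := PySem.Int.mod_nonneg (a := -(n : Int)) (b := (m : Int)) (by exact_mod_cast hmpos)
    have hmodlt := PySem.Int.mod_lt (a := -(n : Int)) (b := (m : Int)) (by exact_mod_cast hmpos)
    have hqm : (n : Int) ≤ q * (m : Int) := by
      have : q * (m : Int) = (n : Int) + PySem.Int.mod (-(n : Int)) (m : Int) := by
        rw [hq]; linarith [hdm]
      omega
    have hq0 : 0 ≤ q := by nlinarith
    have hnq : n ≤ q.toNat * m := by
      have : ((q.toNat * m : Nat) : Int) = q * m := by push_cast; rw [Int.toNat_of_nonneg hq0]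
      omega
    rw [PySem.List.slice_to _ _]
    simp only [Int.toNat_natCast]
    rw [show PySem.List.pyRepeat k.toList q = (List.replicate q.toNat k.toList).flatten
          from rfl,
      List.map_flatten, List.map_replicate, flatten_replicate_eq_cyc, hLlen, cyc_take,
      Nat.min_eq_left hnq, max_eq_left (le_of_lt hgt)]
    positivity

-- ===== VERDICT (by name: the statement is the Claim_ definition above) =====
theorem keyExtend_spec : Claim_equal_keyExtend := by
  intro s k _ hpre
  unfold Spec_keyExtend
  rw [keyExtend_eq_cyc s k hpre, keyExtend_alt_eq_cyc s k hpre]
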